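-- pv_equiv track=rewrite | github.com/ACFHarbinger/WSmartPlus-Route | logic/src/policies/helpers/operators/crossover_recombination/generalized_partition.py | _get_physical_edges
-- ===== SOURCE A (Python) =====
-- from typing import TYPE_CHECKING, Dict, List, Optional, Set, Tuple
--
-- def _get_physical_edges(routes: List[List[int]]) -> Set[Tuple[int, int]]:
--     """
--     Get physical edges from routes.
--
--     Args:
--         routes: List of routes.
--
--     Returns:
--         Set of physical edges.
--     """
--     edges: Set[Tuple[int, int]] = set()
--     for route in routes:
--         if not route:
--             continue
--         edges.add((0, route[0]))
--         for i in range(len(route) - 1):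
--             edges.add((route[i], route[i + 1]))
--         edges.add((route[-1], 0))
--     return edges
-- ===== SOURCE B (Python) =====
-- from typing import List, Set, Tuple
--
-- def _get_physical_edges(routes: List[List[int]]) -> Set[Tuple[int, int]]:
--     # Flatten all non-empty routes into one depot-separated node stream
--     # [0, r1..., 0, r2..., 0, ...]; every physical edge is exactly one
--     # consecutive pair of this single stream.
--     stream = [0] + [node for route in routes if route for node in route + [0]]
--     return set(zip(stream, stream[1:]))
-- ===== Notes on version B (the rewrite author's own statement) =====
-- stated objective: simpler
-- what changed: B replaces A's per-route loop with its three special-case edge adds by two flat stages: flatten all non-empty routes into one depot-separated node stream [0, r1..., 0, r2..., 0, ...], then take the set of that single stream's consecutive pairs.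
import Mathlib
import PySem

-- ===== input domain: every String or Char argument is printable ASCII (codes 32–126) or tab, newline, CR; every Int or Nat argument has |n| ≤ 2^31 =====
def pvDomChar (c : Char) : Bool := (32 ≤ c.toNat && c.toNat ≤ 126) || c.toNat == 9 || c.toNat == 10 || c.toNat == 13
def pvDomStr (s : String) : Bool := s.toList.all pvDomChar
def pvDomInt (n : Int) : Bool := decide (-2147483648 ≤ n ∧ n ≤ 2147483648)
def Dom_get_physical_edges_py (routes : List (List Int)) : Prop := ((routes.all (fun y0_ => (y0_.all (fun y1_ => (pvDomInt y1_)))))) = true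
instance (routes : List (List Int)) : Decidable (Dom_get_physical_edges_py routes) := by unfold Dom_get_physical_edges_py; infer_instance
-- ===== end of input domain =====

-- B flattens all non-empty routes into one depot-separated node stream [0, r1…, 0, r2…, 0, …]
-- and takes the set of that single stream's consecutive pairs (simpler: two flat stages, no
-- per-route special-case adds and no index loop).

-- ===== PORT A =====
def get_physical_edges_py (routes : List (List Int)) : List (Int × Int) :=
  routes.foldl (fun edges route =>
    if route = [] then edges
    else
      let e1 := PySem.Set.add edges (0, PySem.List.pyGetD route 0 0)
      let e2 := (PySem.List.pyRange 0 ((route.length : Int) - 1) 1).foldl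
        (fun e i => PySem.Set.add e (PySem.List.pyGetD route i 0, PySem.List.pyGetD route (i + 1) 0)) e1
      PySem.Set.add e2 (PySem.List.pyGetD route (-1) 0, 0)) []

-- ===== PORT B =====
def get_physical_edges_py_alt (routes : List (List Int)) : List (Int × Int) :=
  let stream : List Int :=
    0 :: routes.flatMap (fun route => if route = [] then [] else route ++ [0])
  PySem.Set.ofList (stream.zip stream.tail)

-- ===== PRECONDITION & SPEC =====
def Spec_get_physical_edges_py (routes : List (List Int)) (out : List (Int × Int)) : Prop := out = get_physical_edges_py_alt routes
instance (routes : List (List Int)) (out : List (Int × Int)) : Decidable (Spec_get_physical_edges_py routes out) := by unfold Spec_get_physical_edges_py; infer_instance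

-- ===== CLAIM (what is proved, stated in full; the proofs are below) =====
def Claim_equal_get_physical_edges_py : Prop := ∀ (routes : List (List Int)), Dom_get_physical_edges_py routes → Spec_get_physical_edges_py routes (get_physical_edges_py routes)

-- ===== LEMMAS AND PROOFS =====

-- A's index loop reads exactly the consecutive pairs of the route, in order.
theorem pv_map_pairs (r : List Int) :
    (PySem.List.pyRange 0 ((r.length : Int) - 1) 1).map
      (fun i => (PySem.List.pyGetD r i 0, PySem.List.pyGetD r (i + 1) 0))
    = r.zip r.tail := by
  apply List.ext_getElem
  · simp [PySem.List.length_pyRange_one]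
  · intro k h1 h2
    have hk : k < r.length - 1 := by
      simp [PySem.List.length_pyRange_one] at h1; omega
    simp only [List.getElem_map, PySem.List.getElem_pyRange_one, zero_add,
      List.getElem_zip, List.getElem_tail]
    rw [PySem.List.pyGetD_eq_getElem r 0 (by omega) (by omega),
      PySem.List.pyGetD_eq_getElem r 0 (by omega) (by omega)]
    congr 1 <;> omega

-- appending the closing depot 0 appends the closing edge to the pair list
theorem pv_zip_append (r : List Int) (h : r ≠ []) :
    (r ++ [(0 : Int)]).zip (r.tail ++ [(0 : Int)])
    = r.zip r.tail ++ [(r.getLast h, 0)] := by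
  induction r with
  | nil => exact absurd rfl h
  | cons a t ih =>
    cases t with
    | nil => simp
    | cons b t' =>
      simp only [List.cons_append, List.zip_cons_cons, List.tail_cons] at ih ⊢
      rw [ih (by simp)]
      simp [List.getLast]

-- per-route: A's three-part add sequence is one Set.update with the padded route's pairs
theorem pv_step (edges : List (Int × Int)) (route : List Int) :
    (if route = [] then edges
     else
       let e1 := PySem.Set.add edges (0, PySem.List.pyGetD route 0 0)
       let e2 := (PySem.List.pyRange 0 ((route.length : Int) - 1) 1).foldl
         (fun e i => PySem.Set.add e (PySem.List.pyGetD route i 0, PySem.List.pyGetD route (i + 1) 0)) e1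
       PySem.Set.add e2 (PySem.List.pyGetD route (-1) 0, 0))
    = (if route = [] then edges
       else PySem.Set.update edges ((0 :: route ++ [0]).zip (route ++ [0]))) := by
  cases route with
  | nil => rfl
  | cons h t =>
    simp only [reduceCtorEq, if_false, List.cons_append, List.zip_cons_cons]
    have hmap := pv_map_pairs (h :: t)
    simp only [List.tail_cons] at hmap
    have hfold :
        (PySem.List.pyRange 0 (((h :: t).length : Int) - 1) 1).foldl
          (fun e i => PySem.Set.add e
            (PySem.List.pyGetD (h :: t) i 0, PySem.List.pyGetD (h :: t) (i + 1) 0))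
          (PySem.Set.add edges (0, PySem.List.pyGetD (h :: t) 0 0))
        = ((h :: t).zip t).foldl PySem.Set.add
            (PySem.Set.add edges (0, PySem.List.pyGetD (h :: t) 0 0)) := by
      rw [← hmap, List.foldl_map]
    rw [hfold, PySem.List.pyGetD_zero_cons, PySem.List.pyGetD_neg_one (h :: t) 0 (by simp)]
    have hz := pv_zip_append (h :: t) (by simp)
    simp only [List.tail_cons, List.cons_append] at hz
    show _ = ((0, h) :: ((h :: t) ++ [0]).zip (t ++ [0])).foldl PySem.Set.add edges
    simp only [List.cons_append] at hz ⊢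
    rw [hz]
    simp [List.foldl_append]

-- folding per-route updates is one update with the concatenation of all pair lists
theorem pv_foldl_update (routes : List (List Int)) (edges : List (Int × Int)) :
    routes.foldl (fun e r =>
      if r = [] then e else PySem.Set.update e ((0 :: r ++ [0]).zip (r ++ [0]))) edges
    = PySem.Set.update edges
        (routes.flatMap (fun r => if r = [] then [] else (0 :: r ++ [0]).zip (r ++ [0]))) := by
  induction routes generalizing edges with
  | nil => rfl
  | cons r rest ih =>
    simp only [List.foldl_cons, List.flatMap_cons, ih]
    by_cases h : r = [] <;> simp [h, PySem.Set.update, List.foldl_append]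

-- splitting a pair list at an interior element
theorem pv_pairs_split (s : List Int) (a : Int) (t : List Int) :
    (s ++ a :: t).zip (s ++ a :: t).tail
    = (s ++ [a]).zip (s ++ [a]).tail ++ (a :: t).zip t := by
  induction s with
  | nil => simp
  | cons x s ih =>
    cases s with
    | nil => simp
    | cons y s' =>
      simp only [List.cons_append, List.tail_cons, List.zip_cons_cons] at ih ⊢
      rw [ih]

-- the depot-separated stream's consecutive pairs are exactly the per-route padded pairs, in order
theorem pv_stream_pairs (routes : List (List Int)) :
    ((0 : Int) :: routes.flatMap (fun r => if r = [] then [] else r ++ [0])).zip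
      (routes.flatMap (fun r => if r = [] then [] else r ++ [0]))
    = routes.flatMap (fun r => if r = [] then [] else (0 :: r ++ [0]).zip (r ++ [0])) := by
  induction routes with
  | nil => rfl
  | cons r rest ih =>
    by_cases h : r = []
    · simpa [h] using ih
    · simp only [List.flatMap_cons, h, if_false]
      have : (r ++ [(0 : Int)]) ++ rest.flatMap (fun r => if r = [] then [] else r ++ [0])
          = r ++ (0 :: rest.flatMap (fun r => if r = [] then [] else r ++ [0])) := by simp
      rw [List.cons_append, this]
      have hsplit := pv_pairs_split ((0 : Int) :: r) 0
        (rest.flatMap (fun r => if r = [] then [] else r ++ [0]))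
      simp only [List.cons_append, List.tail_cons] at hsplit ⊢
      rw [hsplit, ih]
      rfl

-- ===== VERDICT (by name: the statement is the Claim_ definition above) =====
theorem get_physical_edges_py_spec : Claim_equal_get_physical_edges_py := by
  intro routes _
  unfold Spec_get_physical_edges_py get_physical_edges_py get_physical_edges_py_alt
  have hA : routes.foldl (fun edges route =>
      if route = [] then edges
      else
        let e1 := PySem.Set.add edges (0, PySem.List.pyGetD route 0 0)
        let e2 := (PySem.List.pyRange 0 ((route.length : Int) - 1) 1).foldl
          (fun e i => PySem.Set.add e (PySem.List.pyGetD route i 0, PySem.List.pyGetD route (i + 1) 0)) e1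
        PySem.Set.add e2 (PySem.List.pyGetD route (-1) 0, 0)) []
      = routes.foldl (fun e r =>
          if r = [] then e else PySem.Set.update e ((0 :: r ++ [0]).zip (r ++ [0]))) [] :=
    congrFun (congrFun (congrArg List.foldl (funext fun e => funext fun r => pv_step e r)) []) routes
  rw [hA, pv_foldl_update]
  show _ = PySem.Set.ofList _
  rw [List.tail_cons, pv_stream_pairs]
  rfl
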